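-- pv_equiv track=rewrite | github.com/californinson/pyats_scripts | pyats_scripts/get_bgp_table_standalone.py | fix_ipv6_raw_output
-- ===== SOURCE A (Python) =====
-- def fix_ipv6_raw_output(raw_output):
--     """Normalize multi-line IPv6 'show bgp' into parsable lines."""
--     lines = raw_output.splitlines()
--     valid_lines = []
--     prev = ""
--     found = False
--     header = []
--
--     for ln in lines:
--         if 'Route Distinguisher Version' in ln or ('Network' in ln and 'Metric' in ln):
--             header.append(ln)
--             found = True
--             continue
--         if not found:
--             header.append(ln)
--             continue
--
--         ln = ln.rstrip()
--         if ln.startswith('*'):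
--             if prev:
--                 valid_lines.append(prev)
--             prev = ln
--         else:
--             if 'Processed' not in ln:
--                 prev += " " + ln.strip()
--
--     if prev:
--         valid_lines.append(prev)
--
--     return "\n".join(header + valid_lines)
-- ===== SOURCE B (Python) =====
-- def fix_ipv6_raw_output(raw_output):
--     """Normalize multi-line IPv6 'show bgp' into parsable lines."""
--     lines = raw_output.splitlines()
--
--     def is_header(ln):
--         return 'Route Distinguisher Version' in ln or ('Network' in ln and 'Metric' in ln)
--
--     idx = next((i for i, ln in enumerate(lines) if is_header(ln)), None)
--     if idx is None:
--         return "\n".join(lines)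
--
--     tail = lines[idx + 1:]
--     header = lines[:idx + 1] + [ln for ln in tail if is_header(ln)]
--
--     records = []
--     for ln in tail:
--         if is_header(ln):
--             continue
--         ln = ln.rstrip()
--         if ln.startswith('*'):
--             records.append(ln)
--         elif 'Processed' not in ln and records:
--             records[-1] += " " + ln.strip()
--
--     return "\n".join(header + records)
-- ===== Notes on version B (the rewrite author's own statement) =====
-- stated objective: alternative
-- what changed: A threads a found-flag and a string accumulator prev through one stateful scan; B first locates the header boundary with next/enumerate, splits the lines into header and body by the header predicate, then builds a list of records, starting a record at each '*' line and appending continuation text to records[-1].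
-- intended difference: On inputs where a continuation line (non-header, not containing 'Processed') follows the header boundary before any asterisk-initial route line, A emits those orphan fragments as an extra line with a leading space; B drops them, since continuation fragments with no route entry to attach to are not parsable records. — e.g. on fix_ipv6_raw_output("Network Metric\nx"): A returns "Network Metric\n x", B returns "Network Metric"
import Mathlib
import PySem

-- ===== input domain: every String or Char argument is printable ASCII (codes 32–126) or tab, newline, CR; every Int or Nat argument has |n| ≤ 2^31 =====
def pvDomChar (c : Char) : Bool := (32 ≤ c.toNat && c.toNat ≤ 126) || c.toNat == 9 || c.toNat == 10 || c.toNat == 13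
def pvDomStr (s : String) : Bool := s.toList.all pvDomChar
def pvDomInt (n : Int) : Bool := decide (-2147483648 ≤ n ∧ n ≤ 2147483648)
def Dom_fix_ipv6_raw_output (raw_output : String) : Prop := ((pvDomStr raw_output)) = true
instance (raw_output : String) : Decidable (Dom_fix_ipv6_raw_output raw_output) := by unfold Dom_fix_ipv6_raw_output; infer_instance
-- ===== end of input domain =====

-- B replaces A's found-flag/string-accumulator scan by: locate the header boundary, split
-- header from body, then build a record list attaching continuations to the last record
-- (objective: alternative); B drops orphan continuation fragments (see D_ below).

-- ===== PORT A =====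
-- the header test inlined in A's loop
def pvHeaderA (ln : String) : Bool :=
  PySem.Str.isIn "Route Distinguisher Version" ln ||
    (PySem.Str.isIn "Network" ln && PySem.Str.isIn "Metric" ln)

-- A's loop body: state (valid_lines, prev, found, header)
def pvStepA (st : List String × String × Bool × List String) (ln : String) :
    List String × String × Bool × List String :=
  match st with
  | (valid, prev, found, header) =>
    if pvHeaderA ln then (valid, prev, true, header ++ [ln])
    else if found = false then (valid, prev, found, header ++ [ln])
    else
      let l := PySem.Str.rstrip ln
      if PySem.Str.startswith l "*" then
        ((if prev = "" then valid else valid ++ [prev]), l, found, header)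
      else if PySem.Str.isIn "Processed" l then (valid, prev, found, header)
      else (valid, prev ++ " " ++ PySem.Str.strip l, found, header)

def fix_ipv6_raw_output (raw_output : String) : String :=
  let lines := PySem.Str.splitlines raw_output
  match lines.foldl pvStepA ([], "", false, []) with
  | (valid, prev, _, header) =>
    PySem.Str.join "\n" (header ++ (if prev = "" then valid else valid ++ [prev]))

-- ===== PORT B =====
-- B's loop over tail (is_header is the same test as A's pvHeaderA and is shared)
-- records, with 'continue' on header lines; records[-1] += …
-- is ported as dropLast ++ [getLast! ++ …] (exact: the guard ensures records ≠ [])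
def pvStepB (records : List String) (ln : String) : List String :=
  if pvHeaderA ln then records
  else
    let l := PySem.Str.rstrip ln
    if PySem.Str.startswith l "*" then records ++ [l]
    else if !PySem.Str.isIn "Processed" l && !records.isEmpty then
      records.dropLast ++ [records.getLast! ++ " " ++ PySem.Str.strip l]
    else records

def fix_ipv6_raw_output_alt (raw_output : String) : String :=
  let lines := PySem.Str.splitlines raw_output
  -- next((i for i, ln in enumerate(lines) if is_header(ln)), None)
  match List.findIdx? pvHeaderA lines with
  | none => PySem.Str.join "\n" lines
  | some idx =>
    -- lines[idx+1:] / lines[:idx+1] with a nonnegative in-range bound = drop/take (exact here)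
    let tail := lines.drop (idx + 1)
    let header := lines.take (idx + 1) ++ tail.filter pvHeaderA
    let records := tail.foldl pvStepB []
    PySem.Str.join "\n" (header ++ records)

-- ===== PRECONDITION & SPEC =====
-- On inputs where a continuation line (non-header, not containing 'Processed') follows the
-- header boundary before any asterisk-initial route line, A emits those orphan fragments as an extra line
-- with a leading space; B drops them, since continuation fragments with no route entry to
-- attach to are not parsable records.
def D_fix_ipv6_raw_output (raw_output : String) : Prop :=
  let B := ((PySem.Str.splitlines raw_output).dropWhile (!pvHeaderA ·)).tail
  let R := B.map PySem.Str.rstrip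
  ∃ j < B.length, ¬ pvHeaderA B[j]! ∧ ¬ PySem.Str.startswith R[j]! "*" ∧
    ¬ PySem.Str.isIn "Processed" R[j]! ∧
    ∀ k < j, pvHeaderA B[k]! ∨ ¬ PySem.Str.startswith R[k]! "*"
instance (raw_output : String) : Decidable (D_fix_ipv6_raw_output raw_output) := by
  unfold D_fix_ipv6_raw_output; infer_instance

def Spec_fix_ipv6_raw_output (raw_output : String) (out : String) : Prop :=
  ¬ D_fix_ipv6_raw_output raw_output → out = fix_ipv6_raw_output_alt raw_output
instance (raw_output : String) (out : String) : Decidable (Spec_fix_ipv6_raw_output raw_output out) := by unfold Spec_fix_ipv6_raw_output; infer_instance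

def pvDiffWitness_fix_ipv6_raw_output : String := "Network Metric\nx"
def pvDiffWitnessOut_fix_ipv6_raw_output : String × String := ("Network Metric\n x", "Network Metric")

-- ===== CLAIM (what is proved, stated in full; the proofs are below) =====
def Claim_unchanged_fix_ipv6_raw_output : Prop := ∀ (raw_output : String), Dom_fix_ipv6_raw_output raw_output → Spec_fix_ipv6_raw_output raw_output (fix_ipv6_raw_output raw_output)
def Claim_changed_fix_ipv6_raw_output : Prop := Dom_fix_ipv6_raw_output (pvDiffWitness_fix_ipv6_raw_output) ∧ D_fix_ipv6_raw_output (pvDiffWitness_fix_ipv6_raw_output) ∧ fix_ipv6_raw_output (pvDiffWitness_fix_ipv6_raw_output) = pvDiffWitnessOut_fix_ipv6_raw_output.1 ∧ fix_ipv6_raw_output_alt (pvDiffWitness_fix_ipv6_raw_output) = pvDiffWitnessOut_fix_ipv6_raw_output.2 ∧ pvDiffWitnessOut_fix_ipv6_raw_output.1 ≠ pvDiffWitnessOut_fix_ipv6_raw_output.2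
def Claim_exact_fix_ipv6_raw_output : Prop := ∀ (raw_output : String), Dom_fix_ipv6_raw_output raw_output → D_fix_ipv6_raw_output raw_output → fix_ipv6_raw_output raw_output ≠ fix_ipv6_raw_output_alt raw_output

-- ===== LEMMAS AND PROOFS =====

-- A's loop restricted to found = true, header lines stripped out: state (valid, prev)
def pvStepBody (st : List String × String) (ln : String) : List String × String :=
  match st with
  | (valid, prev) =>
    let l := PySem.Str.rstrip ln
    if PySem.Str.startswith l "*" then
      ((if prev = "" then valid else valid ++ [prev]), l)
    else if PySem.Str.isIn "Processed" l then (valid, prev)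
    else (valid, prev ++ " " ++ PySem.Str.strip l)


theorem getLast!_concat_str (v : List String) (p : String) : (v ++ [p]).getLast! = p := by
  induction v with
  | nil => rfl
  | cons a v ih => simpa [List.getLast!] using ih

theorem append_space_ne_empty (p q : String) : p ++ " " ++ q ≠ "" := by
  intro h
  have := congrArg String.length h
  simp [String.length_append] at this

theorem stepA_header (v : List String) (p : String) (f : Bool) (h : List String)
    (ln : String) (hp : pvHeaderA ln = true) :
    pvStepA (v, p, f, h) ln = (v, p, true, h ++ [ln]) := by
  simp [pvStepA, hp]

theorem stepA_pre (v : List String) (p : String) (h : List String)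
    (ln : String) (hp : pvHeaderA ln = false) :
    pvStepA (v, p, false, h) ln = (v, p, false, h ++ [ln]) := by
  simp [pvStepA, hp]

theorem stepA_body (v : List String) (p : String) (h : List String)
    (ln : String) (hp : pvHeaderA ln = false) :
    pvStepA (v, p, true, h) ln =
      ((pvStepBody (v, p) ln).1, (pvStepBody (v, p) ln).2, true, h) := by
  simp only [pvStepA, pvStepBody, hp, Bool.false_eq_true, if_false,
    show ((true = false) = False) by simp]
  split <;> split <;> rfl

-- Phase 1: until the first header match, A only accumulates into header.
theorem foldA_notfound : ∀ (ls : List String) (h0 : List String),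
    List.foldl pvStepA ([], "", false, h0) ls =
      match List.findIdx? pvHeaderA ls with
      | none => ([], "", false, h0 ++ ls)
      | some i => List.foldl pvStepA ([], "", true, h0 ++ ls.take (i + 1)) (ls.drop (i + 1)) := by
  intro ls
  induction ls with
  | nil => intro h0; simp [List.findIdx?, List.findIdx?.go]
  | cons ln ls ih =>
    intro h0
    rw [List.findIdx?_cons]
    by_cases hp : pvHeaderA ln = true
    · simp only [hp, if_true, List.foldl_cons, stepA_header _ _ _ _ _ hp]
      simp [List.take, List.drop]
    · rw [Bool.not_eq_true] at hp
      simp only [hp, Bool.false_eq_true, if_false, List.foldl_cons, stepA_pre _ _ _ _ hp, ih]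
      cases hidx : List.findIdx? pvHeaderA ls with
      | none => simp
      | some i => simp [List.take, List.drop, List.append_assoc]

-- Phase 2: with found = true, header-matching lines go to header, the rest run pvStepBody.
theorem foldA_found : ∀ (ls : List String) (v : List String) (p : String) (h : List String),
    List.foldl pvStepA (v, p, true, h) ls =
      ((List.foldl pvStepBody (v, p) (ls.filter (fun ln => !pvHeaderA ln))).1,
       (List.foldl pvStepBody (v, p) (ls.filter (fun ln => !pvHeaderA ln))).2,
       true, h ++ ls.filter pvHeaderA) := by
  intro ls
  induction ls with
  | nil => intro v p h; simp
  | cons ln ls ih =>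
    intro v p h
    by_cases hp : pvHeaderA ln = true
    · simp only [List.foldl_cons, stepA_header _ _ _ _ _ hp, ih, List.filter_cons, hp,
        Bool.not_true, Bool.false_eq_true, if_false, if_true, List.append_assoc,
        List.singleton_append]
    · rw [Bool.not_eq_true] at hp
      simp only [List.foldl_cons, stepA_body _ _ _ _ hp, ih, List.filter_cons, hp,
        Bool.not_false, Bool.false_eq_true, if_false, if_true]

-- B skips header lines inside its loop: folding over tail = folding over the filtered body.
theorem foldB_filter : ∀ (ls : List String) (r : List String),
    List.foldl pvStepB r ls = List.foldl pvStepB r (ls.filter (fun ln => !pvHeaderA ln)) := by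
  intro ls
  induction ls with
  | nil => intro r; rfl
  | cons ln ls ih =>
    intro r
    by_cases hp : pvHeaderA ln = true
    · have hstep : pvStepB r ln = r := by
        simp [pvStepB, hp]
      simp [hp, hstep, ih]
    · rw [Bool.not_eq_true] at hp
      simp only [List.filter_cons, hp, Bool.not_false, if_true, List.foldl_cons, ih]

theorem star_ne_empty (l : String) (hs : PySem.Str.startswith l "*" = true) : l ≠ "" := by
  intro he; subst he; exact absurd hs (by decide)

theorem stepB_nonheader (r : List String) (ln : String) (hp : pvHeaderA ln = false) :
    pvStepB r ln =
      (let l := PySem.Str.rstrip ln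
       if PySem.Str.startswith l "*" then r ++ [l]
       else if !PySem.Str.isIn "Processed" l && !r.isEmpty then
         r.dropLast ++ [r.getLast! ++ " " ++ PySem.Str.strip l]
       else r) := by
  simp [pvStepB, hp]

-- Once a record has started, A's (valid, prev) and B's record list stay in lockstep.
theorem body_inv : ∀ (body : List String), (∀ ln ∈ body, pvHeaderA ln = false) →
    ∀ (v : List String) (p : String), p ≠ "" →
    List.foldl pvStepB (v ++ [p]) body =
      (List.foldl pvStepBody (v, p) body).1 ++ [(List.foldl pvStepBody (v, p) body).2] ∧
    (List.foldl pvStepBody (v, p) body).2 ≠ "" := by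
  intro body
  induction body with
  | nil => intro _ v p hp; exact ⟨rfl, hp⟩
  | cons ln rest ih =>
    intro hb v p hp
    have hln : pvHeaderA ln = false := hb ln (List.mem_cons_self ..)
    have hrest : ∀ l ∈ rest, pvHeaderA l = false := fun l hl => hb l (List.mem_cons_of_mem _ hl)
    simp only [List.foldl_cons, stepB_nonheader _ _ hln, pvStepBody]
    by_cases hs : PySem.Str.startswith (PySem.Str.rstrip ln) "*" = true
    · simp only [hs, if_true, if_neg hp]
      exact ih hrest (v ++ [p]) (PySem.Str.rstrip ln) (star_ne_empty _ hs)
    · rw [Bool.not_eq_true] at hs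
      simp only [hs, Bool.false_eq_true, if_false]
      by_cases hq : PySem.Str.isIn "Processed" (PySem.Str.rstrip ln) = true
      · simp only [hq, if_true, Bool.not_true, Bool.false_and, Bool.false_eq_true, if_false]
        exact ih hrest v p hp
      · rw [Bool.not_eq_true] at hq
        have hne : (v ++ [p]).isEmpty = false := by simp
        simp only [hq, Bool.false_eq_true, if_false, Bool.not_false, hne, Bool.and_true,
          if_true, List.dropLast_concat, getLast!_concat_str]
        exact ih hrest v (p ++ " " ++ PySem.Str.strip (PySem.Str.rstrip ln))
          (append_space_ne_empty _ _)

-- A's end-of-loop flush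
def pvFinal (st : List String × String) : List String :=
  if st.2 = "" then st.1 else st.1 ++ [st.2]

-- With no orphan continuation line, A never builds a record before the first '*' line,
-- so the flushed A fold equals B's record fold.
theorem body_prefix : ∀ (body : List String), (∀ ln ∈ body, pvHeaderA ln = false) →
    ((body.takeWhile (fun ln => !PySem.Str.startswith (PySem.Str.rstrip ln) "*")).all
        (fun ln => PySem.Str.isIn "Processed" (PySem.Str.rstrip ln))) = true →
    pvFinal (List.foldl pvStepBody ([], "") body) = List.foldl pvStepB [] body := by
  intro body
  induction body with
  | nil => intro _ _; rfl
  | cons ln rest ih =>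
    intro hb hd
    have hln : pvHeaderA ln = false := hb ln (List.mem_cons_self ..)
    have hrest : ∀ l ∈ rest, pvHeaderA l = false := fun l hl => hb l (List.mem_cons_of_mem _ hl)
    simp only [List.foldl_cons, stepB_nonheader _ _ hln, pvStepBody]
    by_cases hs : PySem.Str.startswith (PySem.Str.rstrip ln) "*" = true
    · simp only [hs, if_true, List.nil_append]
      obtain ⟨heq, hne⟩ := body_inv rest hrest [] (PySem.Str.rstrip ln) (star_ne_empty _ hs)
      rw [pvFinal, if_neg hne, ← heq]
      rfl
    · rw [Bool.not_eq_true] at hs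
      rw [List.takeWhile_cons_of_pos (by rw [hs]; rfl), List.all_cons, Bool.and_eq_true] at hd
      obtain ⟨hq, hrest'⟩ := hd
      simp only [hs, Bool.false_eq_true, if_false, hq, if_true, Bool.not_true, Bool.false_and,
        Bool.false_eq_true]
      exact ih hrest hrest'

-- proof-side: the boolean form of the orphan condition, phrased on A's loop predicates
def pvOrphan (lines : List String) : Bool :=
  match List.findIdx? pvHeaderA lines with
  | none => false
  | some i =>
      ((((lines.drop (i + 1)).filter (fun ln => !pvHeaderA ln)).takeWhile
          (fun ln => !PySem.Str.startswith (PySem.Str.rstrip ln) "*")).any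
        (fun ln => !PySem.Str.isIn "Processed" (PySem.Str.rstrip ln)))

theorem main_eq (ls : List String) (hD : pvOrphan ls = false) :
    (match ls.foldl pvStepA ([], "", false, []) with
     | (valid, prev, _, header) =>
       PySem.Str.join "\n" (header ++ (if prev = "" then valid else valid ++ [prev]))) =
    (match List.findIdx? pvHeaderA ls with
     | none => PySem.Str.join "\n" ls
     | some idx =>
       PySem.Str.join "\n" ((ls.take (idx + 1) ++ (ls.drop (idx + 1)).filter pvHeaderA) ++
         (ls.drop (idx + 1)).foldl pvStepB [])) := by
  unfold pvOrphan at hD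
  rw [foldA_notfound]
  cases hidx : List.findIdx? pvHeaderA ls with
  | none => simp
  | some i =>
    rw [hidx] at hD
    simp only at hD ⊢
    rw [foldA_found, foldB_filter (ls.drop (i + 1)) []]
    have hball : ∀ ln ∈ (ls.drop (i + 1)).filter (fun ln => !pvHeaderA ln),
        pvHeaderA ln = false := by
      intro ln hln
      have := (List.mem_filter.mp hln).2
      simpa using this
    have hall : ((((ls.drop (i + 1)).filter (fun ln => !pvHeaderA ln)).takeWhile
            (fun ln => !PySem.Str.startswith (PySem.Str.rstrip ln) "*")).all
          (fun ln => PySem.Str.isIn "Processed" (PySem.Str.rstrip ln))) = true := by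
      rw [List.all_eq_true]
      intro ln hln
      by_contra hq
      rw [Bool.not_eq_true] at hq
      have : (((ls.drop (i + 1)).filter (fun ln => !pvHeaderA ln)).takeWhile
          (fun ln => !PySem.Str.startswith (PySem.Str.rstrip ln) "*")).any
            (fun ln => !PySem.Str.isIn "Processed" (PySem.Str.rstrip ln)) = true := by
        rw [List.any_eq_true]; exact ⟨ln, hln, by rw [hq]; rfl⟩
      rw [this] at hD
      exact absurd hD (by simp)
    rw [← body_prefix _ hball hall]
    rcases h : List.foldl pvStepBody ([], "")
        ((ls.drop (i + 1)).filter (fun ln => !pvHeaderA ln)) with ⟨v, p⟩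
    simp only [pvFinal]
    by_cases hp : p = "" <;> simp [hp]


-- if the body scan finds a non-'Processed' continuation line before any '*' line,
-- it sits at some index j with only header or non-'*' lines before it
theorem orphan_tail : ∀ (t : List String),
    ((((t.filter (fun ln => !pvHeaderA ln)).takeWhile
        (fun ln => !PySem.Str.startswith (PySem.Str.rstrip ln) "*")).any
      (fun ln => !PySem.Str.isIn "Processed" (PySem.Str.rstrip ln))) = true) →
    ∃ j, ∃ hj : j < t.length,
      pvHeaderA t[j] = false ∧
      PySem.Str.startswith (PySem.Str.rstrip t[j]) "*" = false ∧
      PySem.Str.isIn "Processed" (PySem.Str.rstrip t[j]) = false ∧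
      ∀ k, (hk : k < t.length) → k < j →
        (pvHeaderA t[k] = true ∨ PySem.Str.startswith (PySem.Str.rstrip t[k]) "*" = false) := by
  intro t
  induction t with
  | nil => intro h; simp at h
  | cons a t ih =>
    intro h
    by_cases hh : pvHeaderA a = true
    · simp only [List.filter_cons, hh, Bool.not_true, Bool.false_eq_true, if_false] at h
      obtain ⟨j, hj, c1, c2, c3, c4⟩ := ih h
      refine ⟨j + 1, Nat.succ_lt_succ hj, by simpa using c1, by simpa using c2,
        by simpa using c3, ?_⟩
      intro k hk hkj
      cases k with
      | zero => exact Or.inl (by simpa using hh)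
      | succ m =>
        have hm : m < t.length := Nat.lt_of_succ_lt_succ hk
        have := c4 m hm (Nat.lt_of_succ_lt_succ hkj)
        simpa using this
    · rw [Bool.not_eq_true] at hh
      by_cases hst : PySem.Str.startswith (PySem.Str.rstrip a) "*" = true
      · exfalso
        simp only [List.filter_cons, hh, Bool.not_false, if_true,
          List.takeWhile_cons, hst, Bool.not_true, Bool.false_eq_true, if_false,
          List.any_nil] at h
      · rw [Bool.not_eq_true] at hst
        by_cases hpr : PySem.Str.isIn "Processed" (PySem.Str.rstrip a) = true
        · simp only [List.filter_cons, hh, Bool.not_false, if_true,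
            List.takeWhile_cons, hst, if_true, List.any_cons, hpr, Bool.not_true,
            Bool.false_or] at h
          obtain ⟨j, hj, c1, c2, c3, c4⟩ := ih h
          refine ⟨j + 1, Nat.succ_lt_succ hj, by simpa using c1, by simpa using c2,
            by simpa using c3, ?_⟩
          intro k hk hkj
          cases k with
          | zero => exact Or.inr (by simpa using hst)
          | succ m =>
            have hm : m < t.length := Nat.lt_of_succ_lt_succ hk
            have := c4 m hm (Nat.lt_of_succ_lt_succ hkj)
            simpa using this
        · rw [Bool.not_eq_true] at hpr
          exact ⟨0, Nat.succ_pos _, by simpa using hh, by simpa using hst,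
            by simpa using hpr, fun k hk hkj => absurd hkj (by omega)⟩

-- dropWhile of the non-header prefix = drop at the first header index
theorem dropWhile_eq_drop_findIdx : ∀ (l : List String) (i : Nat),
    List.findIdx? pvHeaderA l = some i →
    l.dropWhile (fun ln => !pvHeaderA ln) = l.drop i := by
  intro l
  induction l with
  | nil => intro i h; simp at h
  | cons a l ih =>
    intro i h
    rw [List.findIdx?_cons] at h
    by_cases hp : pvHeaderA a = true
    · rw [if_pos hp] at h
      obtain rfl : i = 0 := by simpa using h.symm
      simp [List.dropWhile_cons, hp]
    · rw [Bool.not_eq_true] at hp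
      rw [if_neg (by simp [hp])] at h
      cases hfi : List.findIdx? pvHeaderA l with
      | none => rw [hfi] at h; simp at h
      | some i' =>
        rw [hfi] at h
        obtain rfl : i = i' + 1 := by simpa using h.symm
        simp [List.dropWhile_cons, hp, ih i' hfi]

-- the getElem!/map form of orphan_tail
theorem orphan_tail' (t : List String)
    (h : ((((t.filter (fun ln => !pvHeaderA ln)).takeWhile
        (fun ln => !PySem.Str.startswith (PySem.Str.rstrip ln) "*")).any
      (fun ln => !PySem.Str.isIn "Processed" (PySem.Str.rstrip ln))) = true)) :
    ∃ j, j < t.length ∧ (¬ pvHeaderA t[j]! ∧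
      ¬ PySem.Str.startswith (t.map PySem.Str.rstrip)[j]! "*" ∧
      ¬ PySem.Str.isIn "Processed" (t.map PySem.Str.rstrip)[j]! ∧
      ∀ k, k < j → (pvHeaderA t[k]! ∨
        ¬ PySem.Str.startswith (t.map PySem.Str.rstrip)[k]! "*")) := by
  obtain ⟨j, hj, c1, c2, c3, c4⟩ := orphan_tail t h
  have hjm : j < (t.map PySem.Str.rstrip).length := by simpa using hj
  have hmap : (t.map PySem.Str.rstrip)[j]! = PySem.Str.rstrip t[j] := by
    rw [getElem!_pos (t.map PySem.Str.rstrip) j hjm, List.getElem_map]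
  refine ⟨j, hj, ?_, ?_, ?_, ?_⟩
  · rw [getElem!_pos t j hj, c1]; exact Bool.false_ne_true
  · rw [hmap, c2]; exact Bool.false_ne_true
  · rw [hmap, c3]; exact Bool.false_ne_true
  · intro k hk
    have hkt : k < t.length := Nat.lt_trans hk hj
    have hmapk : (t.map PySem.Str.rstrip)[k]! = PySem.Str.rstrip t[k] := by
      rw [getElem!_pos (t.map PySem.Str.rstrip) k (by simpa using hkt), List.getElem_map]
    rcases c4 k hkt hk with hc | hc
    · left; rw [getElem!_pos t k hkt]; exact hc
    · right; rw [hmapk, hc]; exact Bool.false_ne_true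

-- the boolean orphan condition implies the closed-form change region
theorem orphan_imp (ls : List String) (h : pvOrphan ls = true) :
    ∃ j, j < ((ls.dropWhile (fun ln => !pvHeaderA ln)).tail).length ∧
      (¬ pvHeaderA ((ls.dropWhile (fun ln => !pvHeaderA ln)).tail)[j]! ∧
       ¬ PySem.Str.startswith
          (((ls.dropWhile (fun ln => !pvHeaderA ln)).tail).map PySem.Str.rstrip)[j]! "*" ∧
       ¬ PySem.Str.isIn "Processed"
          (((ls.dropWhile (fun ln => !pvHeaderA ln)).tail).map PySem.Str.rstrip)[j]! ∧
       ∀ k, k < j → (pvHeaderA ((ls.dropWhile (fun ln => !pvHeaderA ln)).tail)[k]! ∨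
         ¬ PySem.Str.startswith
            (((ls.dropWhile (fun ln => !pvHeaderA ln)).tail).map PySem.Str.rstrip)[k]! "*")) := by
  unfold pvOrphan at h
  cases hidx : List.findIdx? pvHeaderA ls with
  | none => rw [hidx] at h; simp at h
  | some i =>
    rw [hidx] at h
    have hB : (ls.dropWhile (fun ln => !pvHeaderA ln)).tail = ls.drop (i + 1) := by
      rw [dropWhile_eq_drop_findIdx ls i hidx, List.tail_drop]
    rw [hB]
    exact orphan_tail' _ h

-- ===== tightness: A ≠ B everywhere inside D_ =====

-- the boolean orphan test on the already-filtered body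
def pvObool (body : List String) : Bool :=
  (body.takeWhile (fun ln => !PySem.Str.startswith (PySem.Str.rstrip ln) "*")).any
    (fun ln => !PySem.Str.isIn "Processed" (PySem.Str.rstrip ln))

-- B's record fold only touches the tail of the record list
theorem foldB_shift : ∀ (body : List String), (∀ ln ∈ body, pvHeaderA ln = false) →
    ∀ (xs ys : List String), ys ≠ [] →
    List.foldl pvStepB (xs ++ ys) body = xs ++ List.foldl pvStepB ys body := by
  intro body
  induction body with
  | nil => intro _ xs ys _; rfl
  | cons ln rest ih =>
    intro hb xs ys hys
    have hln := hb ln (List.mem_cons_self ..)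
    have hrest : ∀ l ∈ rest, pvHeaderA l = false := fun l hl => hb l (List.mem_cons_of_mem _ hl)
    rcases List.eq_nil_or_concat ys with rfl | ⟨zs, z, rfl⟩
    · exact absurd rfl hys
    · simp only [List.concat_eq_append, List.foldl_cons, stepB_nonheader _ _ hln]
      by_cases hs : PySem.Str.startswith (PySem.Str.rstrip ln) "*" = true
      · simp only [hs, if_true, List.append_assoc]
        rw [← List.append_assoc zs]
        exact ih hrest xs _ (by simp)
      · rw [Bool.not_eq_true] at hs
        simp only [hs, Bool.false_eq_true, if_false]
        by_cases hq : PySem.Str.isIn "Processed" (PySem.Str.rstrip ln) = true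
        · simp only [hq, Bool.not_true, Bool.false_and, Bool.false_eq_true, if_false]
          exact ih hrest xs _ (by simp)
        · rw [Bool.not_eq_true] at hq
          rw [show xs ++ (zs ++ [z]) = (xs ++ zs) ++ [z] from (List.append_assoc ..).symm]
          have h1 : ((xs ++ zs) ++ [z]).isEmpty = false := by simp
          have h2 : (zs ++ [z]).isEmpty = false := by simp
          simp only [hq, h1, h2, Bool.not_false, Bool.and_true, if_true,
            List.dropLast_concat, getLast!_concat_str]
          rw [List.append_assoc]
          exact ih hrest xs
            (zs ++ [z ++ " " ++ PySem.Str.strip (PySem.Str.rstrip ln)]) (by simp)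

-- once A has a started (nonempty) record and B none, A's flushed output is B's with one extra
theorem flush_started : ∀ (rest : List String), (∀ ln ∈ rest, pvHeaderA ln = false) →
    ∀ p, p ≠ "" →
    ∃ w, w ≠ "" ∧
      pvFinal (List.foldl pvStepBody ([], p) rest) = w :: List.foldl pvStepB [] rest := by
  intro rest
  induction rest with
  | nil =>
    intro _ p hp
    exact ⟨p, hp, by simp [pvFinal, hp]⟩
  | cons ln rest ih =>
    intro hb p hp
    have hln := hb ln (List.mem_cons_self ..)
    have hrest : ∀ l ∈ rest, pvHeaderA l = false := fun l hl => hb l (List.mem_cons_of_mem _ hl)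
    simp only [List.foldl_cons, pvStepBody, stepB_nonheader _ _ hln]
    by_cases hs : PySem.Str.startswith (PySem.Str.rstrip ln) "*" = true
    · simp only [hs, if_true, if_neg hp, List.nil_append]
      obtain ⟨heq, hne⟩ := body_inv rest hrest [p] (PySem.Str.rstrip ln) (star_ne_empty _ hs)
      refine ⟨p, hp, ?_⟩
      rw [pvFinal, if_neg hne, ← heq,
        show [p] ++ [PySem.Str.rstrip ln] = [p] ++ ([] ++ [PySem.Str.rstrip ln]) from by simp,
        foldB_shift rest hrest [p] ([] ++ [PySem.Str.rstrip ln]) (by simp)]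
      rfl
    · rw [Bool.not_eq_true] at hs
      simp only [hs, Bool.false_eq_true, if_false]
      by_cases hq : PySem.Str.isIn "Processed" (PySem.Str.rstrip ln) = true
      · simp only [hq, if_true, Bool.not_true, Bool.false_and, Bool.false_eq_true, if_false]
        exact ih hrest p hp
      · rw [Bool.not_eq_true] at hq
        simp only [hq, Bool.false_eq_true, if_false, Bool.not_false, List.isEmpty_nil,
          Bool.not_true, Bool.and_false, if_false]
        exact ih hrest _ (append_space_ne_empty p _)

-- with an orphan continuation line in the body, A flushes one extra record that B drops
theorem flush_orphan : ∀ (body : List String), (∀ ln ∈ body, pvHeaderA ln = false) →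
    pvObool body = true →
    ∃ w, w ≠ "" ∧
      pvFinal (List.foldl pvStepBody ([], "") body) = w :: List.foldl pvStepB [] body := by
  intro body
  induction body with
  | nil => intro _ h; simp [pvObool] at h
  | cons ln rest ih =>
    intro hb h
    have hln := hb ln (List.mem_cons_self ..)
    have hrest : ∀ l ∈ rest, pvHeaderA l = false := fun l hl => hb l (List.mem_cons_of_mem _ hl)
    simp only [List.foldl_cons, pvStepBody, stepB_nonheader _ _ hln]
    by_cases hs : PySem.Str.startswith (PySem.Str.rstrip ln) "*" = true
    · exfalso
      rw [pvObool, List.takeWhile_cons_of_neg (by rw [hs]; simp)] at h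
      simp at h
    · rw [Bool.not_eq_true] at hs
      rw [pvObool, List.takeWhile_cons_of_pos (by rw [hs]; rfl), List.any_cons,
        Bool.or_eq_true] at h
      by_cases hq : PySem.Str.isIn "Processed" (PySem.Str.rstrip ln) = true
      · simp only [hs, Bool.false_eq_true, if_false, hq, if_true, Bool.not_true,
          Bool.false_and, Bool.false_eq_true]
        rcases h with h | h
        · rw [hq] at h; simp at h
        · exact ih hrest h
      · rw [Bool.not_eq_true] at hq
        simp only [hs, Bool.false_eq_true, if_false, hq, Bool.not_false, List.isEmpty_nil,
          Bool.not_true, Bool.and_false, if_false]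
        exact flush_started rest hrest _ (append_space_ne_empty "" _)

-- the closed-form change region forces the boolean orphan test on the filtered body
theorem D_to_Obool : ∀ (t : List String) (j : Nat) (hj : j < t.length),
    pvHeaderA t[j] = false →
    PySem.Str.startswith (PySem.Str.rstrip t[j]) "*" = false →
    PySem.Str.isIn "Processed" (PySem.Str.rstrip t[j]) = false →
    (∀ k, (hk : k < t.length) → k < j →
      (pvHeaderA t[k] = true ∨ PySem.Str.startswith (PySem.Str.rstrip t[k]) "*" = false)) →
    pvObool (t.filter (fun ln => !pvHeaderA ln)) = true := by
  intro t
  induction t with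
  | nil => intro j hj; exact absurd hj (by simp)
  | cons a t ih =>
    intro j hj h1 h2 h3 h4
    cases j with
    | zero =>
      simp only [List.getElem_cons_zero] at h1 h2 h3
      simp only [List.filter_cons, h1, Bool.not_false, if_true]
      rw [pvObool, List.takeWhile_cons_of_pos (by rw [h2]; rfl), List.any_cons, h3]
      simp
    | succ j' =>
      simp only [List.getElem_cons_succ] at h1 h2 h3
      have hj' : j' < t.length := Nat.lt_of_succ_lt_succ hj
      have h4' : ∀ k, (hk : k < t.length) → k < j' →
          (pvHeaderA t[k] = true ∨ PySem.Str.startswith (PySem.Str.rstrip t[k]) "*" = false) := by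
        intro k hk hkj
        have := h4 (k + 1) (Nat.succ_lt_succ hk) (Nat.succ_lt_succ hkj)
        simpa using this
      rcases h4 0 (Nat.succ_pos _) (Nat.succ_pos _) with ha | ha
      · simp only [List.getElem_cons_zero] at ha
        simp only [List.filter_cons, ha, Bool.not_true, Bool.false_eq_true, if_false]
        exact ih j' hj' h1 h2 h3 h4'
      · simp only [List.getElem_cons_zero] at ha
        by_cases hha : pvHeaderA a = true
        · simp only [List.filter_cons, hha, Bool.not_true, Bool.false_eq_true, if_false]
          exact ih j' hj' h1 h2 h3 h4'
        · rw [Bool.not_eq_true] at hha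
          simp only [List.filter_cons, hha, Bool.not_false, if_true]
          rw [pvObool, List.takeWhile_cons_of_pos (by rw [ha]; rfl), List.any_cons,
            Bool.or_eq_true]
          right
          exact ih j' hj' h1 h2 h3 h4'

theorem join_cons_ne (s a : List Char) (L : List (List Char)) (h : L ≠ []) :
    PySem.Chars.join s (a :: L) = a ++ s ++ PySem.Chars.join s L := by
  cases L with
  | nil => exact absurd rfl h
  | cons b t => exact PySem.Chars.join_cons_cons ..

theorem join_insert_lt (s w : List Char) (hw : w ≠ []) :
    ∀ (hs rs : List (List Char)),
    (PySem.Chars.join s (hs ++ rs)).length < (PySem.Chars.join s (hs ++ w :: rs)).length := by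
  intro hs
  induction hs with
  | nil =>
    intro rs
    cases rs with
    | nil =>
      simpa [PySem.Chars.join_nil, PySem.Chars.join_singleton] using
        List.length_pos_of_ne_nil hw
    | cons b t =>
      rw [List.nil_append, List.nil_append, PySem.Chars.join_cons_cons]
      have := List.length_pos_of_ne_nil hw
      simp only [List.length_append]
      omega
  | cons a hs ih =>
    intro rs
    rcases hrest : hs ++ rs with _ | ⟨b, t⟩
    · obtain ⟨rfl, rfl⟩ := List.append_eq_nil_iff.mp hrest
      have := List.length_pos_of_ne_nil hw
      simp only [List.nil_append, List.cons_append, List.append_nil,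
        PySem.Chars.join_singleton, PySem.Chars.join_cons_cons, PySem.Chars.join_nil,
        List.length_append]
      omega
    · rw [List.cons_append, List.cons_append, join_cons_ne s a _ (by rw [hrest]; simp),
        join_cons_ne s a _ (by simp)]
      have hlt := ih rs
      simp only [List.length_append]
      omega

theorem ne_of_insert (H : List String) (w : String) (recs : List String) (hw : w ≠ "") :
    PySem.Str.join "\n" (H ++ w :: recs) ≠ PySem.Str.join "\n" (H ++ recs) := by
  intro heq
  have ht := congrArg String.toList heq
  rw [PySem.Str.toList_join, PySem.Str.toList_join, List.map_append, List.map_append,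
    List.map_cons] at ht
  have hlt := join_insert_lt "\n".toList w.toList
    (fun h => hw (String.toList_eq_nil_iff.mp h)) (H.map String.toList)
    (recs.map String.toList)
  rw [ht] at hlt
  exact absurd hlt (lt_irrefl _)

theorem main_neq (ls : List String) (i : Nat)
    (hidx : List.findIdx? pvHeaderA ls = some i)
    (hO : pvObool (((ls.drop (i + 1)).filter (fun ln => !pvHeaderA ln))) = true) :
    (match ls.foldl pvStepA ([], "", false, []) with
     | (valid, prev, _, header) =>
       PySem.Str.join "\n" (header ++ (if prev = "" then valid else valid ++ [prev]))) ≠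
    (match List.findIdx? pvHeaderA ls with
     | none => PySem.Str.join "\n" ls
     | some idx =>
       PySem.Str.join "\n" ((ls.take (idx + 1) ++ (ls.drop (idx + 1)).filter pvHeaderA) ++
         (ls.drop (idx + 1)).foldl pvStepB [])) := by
  rw [foldA_notfound, hidx]
  simp only
  rw [foldA_found, foldB_filter (ls.drop (i + 1)) []]
  have hball : ∀ ln ∈ (ls.drop (i + 1)).filter (fun ln => !pvHeaderA ln),
      pvHeaderA ln = false := by
    intro ln hln
    have := (List.mem_filter.mp hln).2
    simpa using this
  obtain ⟨w, hw, hflush⟩ := flush_orphan _ hball hO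
  rcases h : List.foldl pvStepBody ([], "")
      ((ls.drop (i + 1)).filter (fun ln => !pvHeaderA ln)) with ⟨v, p⟩
  rw [h] at hflush
  have hfin : (if p = "" then v else v ++ [p]) =
      w :: List.foldl pvStepB [] ((ls.drop (i + 1)).filter (fun ln => !pvHeaderA ln)) := by
    rw [← hflush]; rfl
  simp only [hfin, List.nil_append]
  exact ne_of_insert _ w _ hw

-- ===== VERDICT (by name: the statement is the Claim_ definition above) =====
theorem fix_ipv6_raw_output_spec : Claim_unchanged_fix_ipv6_raw_output := by
  intro raw _ hD
  by_cases ho : pvOrphan (PySem.Str.splitlines raw) = true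
  · exact absurd (orphan_imp (PySem.Str.splitlines raw) ho) hD
  · rw [Bool.not_eq_true] at ho
    exact main_eq (PySem.Str.splitlines raw) ho

theorem fix_ipv6_raw_output_changed : Claim_changed_fix_ipv6_raw_output := by
  unfold Claim_changed_fix_ipv6_raw_output; decide

theorem fix_ipv6_raw_output_tight : Claim_exact_fix_ipv6_raw_output := by
  intro raw _ hD
  obtain ⟨j, hjB, hn1, hn2, hn3, hk⟩ := hD
  cases hidx : List.findIdx? pvHeaderA (PySem.Str.splitlines raw) with
  | none =>
    have hdw : (PySem.Str.splitlines raw).dropWhile (fun ln => !pvHeaderA ln) = [] := by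
      rw [List.dropWhile_eq_nil_iff]
      intro x hx
      have := List.findIdx?_eq_none_iff.mp hidx x hx
      simpa using this
    rw [hdw] at hjB
    exact absurd hjB (by simp)
  | some i =>
    have hB : ((PySem.Str.splitlines raw).dropWhile (fun ln => !pvHeaderA ln)).tail
        = (PySem.Str.splitlines raw).drop (i + 1) := by
      rw [dropWhile_eq_drop_findIdx _ i hidx, List.tail_drop]
    rw [hB] at hjB hn1 hn2 hn3 hk
    have hjm : j < (((PySem.Str.splitlines raw).drop (i + 1)).map PySem.Str.rstrip).length := by
      simpa using hjB
    rw [getElem!_pos _ j hjB] at hn1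
    rw [getElem!_pos _ j hjm, List.getElem_map] at hn2 hn3
    have c1 : pvHeaderA ((PySem.Str.splitlines raw).drop (i + 1))[j] = false := by
      simpa using hn1
    have c2 : PySem.Str.startswith
        (PySem.Str.rstrip ((PySem.Str.splitlines raw).drop (i + 1))[j]) "*" = false := by
      simpa using hn2
    have c3 : PySem.Str.isIn "Processed"
        (PySem.Str.rstrip ((PySem.Str.splitlines raw).drop (i + 1))[j]) = false := by
      simpa using hn3
    have c4 : ∀ k, (hk' : k < ((PySem.Str.splitlines raw).drop (i + 1)).length) → k < j →
        (pvHeaderA ((PySem.Str.splitlines raw).drop (i + 1))[k] = true ∨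
          PySem.Str.startswith
            (PySem.Str.rstrip ((PySem.Str.splitlines raw).drop (i + 1))[k]) "*" = false) := by
      intro k hkt hkj
      rcases hk k hkj with hc | hc
      · left
        rw [getElem!_pos _ k hkt] at hc
        exact hc
      · right
        rw [getElem!_pos _ k (by simpa using hkt), List.getElem_map] at hc
        simpa using hc
    have hO := D_to_Obool ((PySem.Str.splitlines raw).drop (i + 1)) j hjB c1 c2 c3 c4
    exact main_neq (PySem.Str.splitlines raw) i hidx hO
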